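-- pv_equiv track=rewrite | github.com/juliefolkerts/pp1 | 12-Test3/p1.py | f
-- ===== SOURCE A (Python) =====
-- def f(word):
--     if word:
--         letters = list(word)
--         x = 0
--         arr=[]
--         while x < (len(letters)+1):
--             for i in range(0,len(letters)):
--                 if i == (x):
--                     arr.append((letters[i]).upper())
--                 else:
--                     arr.append((letters[i]).lower())
--             x+= 1
--         answer = []
--         y = len(word)
--         for i in range(0,len(arr)-y,y):
--             word = ''.join(arr[i:(i+y)])
--             answer.append(word)
--         return '-'.join(answer)
--     else:
--         return ''
-- ===== SOURCE B (Python) =====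
-- def f(word):
--     chars = [c.lower() for c in word]
--     return '-'.join(
--         ''.join(chars[:i] + [chars[i].upper()] + chars[i + 1:])
--         for i in range(len(chars)))
-- ===== Notes on version B (the rewrite author's own statement) =====
-- stated objective: simpler
-- what changed: Builds each variant directly from a once-lowercased character list via slices instead of A's two-phase scheme (append (n+1)*n single-char strings one by one into one big arr, then re-chunk arr by slicing and drop the last row).
import Mathlib
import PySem

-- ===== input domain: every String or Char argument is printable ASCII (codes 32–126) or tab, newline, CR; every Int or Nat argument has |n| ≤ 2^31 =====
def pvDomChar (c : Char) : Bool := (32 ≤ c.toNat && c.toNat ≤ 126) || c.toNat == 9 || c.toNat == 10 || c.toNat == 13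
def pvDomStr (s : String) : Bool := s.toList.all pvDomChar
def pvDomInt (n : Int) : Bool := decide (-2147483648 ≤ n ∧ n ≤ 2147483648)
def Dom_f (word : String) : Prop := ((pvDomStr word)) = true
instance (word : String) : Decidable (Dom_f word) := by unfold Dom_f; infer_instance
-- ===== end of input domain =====

-- B builds each variant directly from a once-lowercased character list via slices, instead of A's
-- two-phase scheme (emit n+1 flattened rows into one big arr, then re-chunk arr and drop the last row);
-- objective: simpler.

-- ===== PORT A =====
def f (word : String) : String :=
  if word ≠ "" then
    let letters := word.toList
    let arr : List Char :=
      (PySem.List.pyRange 0 ((letters.length : Int) + 1) 1).foldl (fun arr x =>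
        (PySem.List.pyRange 0 (letters.length : Int) 1).foldl (fun arr i =>
          if i = x then arr ++ [PySem.Chars.upperChar (PySem.List.pyGetD letters i ' ')]
          else arr ++ [PySem.Chars.lowerChar (PySem.List.pyGetD letters i ' ')]) arr) []
    let y : Int := PySem.Str.len word
    let answer : List String :=
      (PySem.List.pyRange 0 ((arr.length : Int) - y) y).foldl (fun answer i =>
        answer ++ [String.ofList (PySem.List.slice arr (some i) (some (i + y)))]) []
    PySem.Str.join "-" answer
  else ""

-- ===== PORT B =====
def f_alt (word : String) : String :=
  let chars := word.toList.map PySem.Chars.lowerChar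
  PySem.Str.join "-" ((List.range chars.length).map (fun i =>
    String.ofList (chars.take i ++ [PySem.Chars.upperChar (chars.getD i ' ')] ++ chars.drop (i + 1))))

-- ===== PRECONDITION & SPEC =====
def Spec_f (word : String) (out : String) : Prop := out = f_alt word
instance (word : String) (out : String) : Decidable (Spec_f word out) := by unfold Spec_f; infer_instance

-- ===== CLAIM (what is proved, stated in full; the proofs are below) =====
def Claim_equal_f : Prop := ∀ (word : String), Dom_f word → Spec_f word (f word)

-- ===== LEMMAS AND PROOFS =====

lemma toNat_ofNat_valid (n : Nat) (h : n.isValidChar) : (Char.ofNat n).toNat = n := by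
  simp [Char.ofNat, h, Char.toNat, Char.ofNatAux]

lemma char_le_iff (a b : Char) : a ≤ b ↔ a.toNat ≤ b.toNat := ge_iff_le

lemma upper_lower (c : Char) :
    PySem.Chars.upperChar (PySem.Chars.lowerChar c) = PySem.Chars.upperChar c := by
  unfold PySem.Chars.lowerChar PySem.Chars.upperChar PySem.Chars.isupper PySem.Chars.islower
  by_cases hA : 'A' ≤ c ∧ c ≤ 'Z'
  · have h1 : 65 ≤ c.toNat := (char_le_iff _ _).mp hA.1
    have h2 : c.toNat ≤ 90 := (char_le_iff _ _).mp hA.2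
    have hv : (c.toNat + 32).isValidChar := Or.inl (by omega)
    have ht := toNat_ofNat_valid _ hv
    have e1 : (if (decide ('A' ≤ c) && decide (c ≤ 'Z')) = true
        then Char.ofNat (c.toNat + 32) else c) = Char.ofNat (c.toNat + 32) := by
      simp [hA.1, hA.2]
    rw [e1]
    have hlo1 : 'a' ≤ Char.ofNat (c.toNat + 32) := by
      rw [char_le_iff, ht]; show 97 ≤ c.toNat + 32; omega
    have hlo2 : Char.ofNat (c.toNat + 32) ≤ 'z' := by
      rw [char_le_iff, ht]; show c.toNat + 32 ≤ 122; omega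
    have hnot : ¬ ('a' ≤ c) := by
      rw [char_le_iff]; show ¬ (97 ≤ c.toNat); omega
    rw [if_pos (by simp [hlo1, hlo2] :
        (decide ('a' ≤ Char.ofNat (c.toNat + 32)) && decide (Char.ofNat (c.toNat + 32) ≤ 'z')) = true)]
    rw [if_neg (by simp [hnot] : ¬ ((decide ('a' ≤ c) && decide (c ≤ 'z')) = true))]
    rw [ht]
    have h3 : c.toNat + 32 - 32 = c.toNat := by omega
    rw [h3, Char.ofNat_toNat]
  · rw [if_neg (by simp only [Bool.and_eq_true, decide_eq_true_eq]; exact hA :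
        ¬ ((decide ('A' ≤ c) && decide (c ≤ 'Z')) = true))]

-- the i-th variant row: everything lowercased except position i, which is uppercased
def varRow (letters : List Char) (k : Nat) : List Char :=
  (List.range letters.length).map (fun j =>
    if j = k then PySem.Chars.upperChar (letters.getD j ' ')
    else PySem.Chars.lowerChar (letters.getD j ' '))

lemma chunk (L : List (List Char)) (n : Nat) :
    ∀ (k : Nat), (∀ r ∈ L, r.length = n) → k < L.length →
      (L.flatten.drop (n * k)).take n = L.getD k [] := by
  induction L with
  | nil => intro k _ hk; simp at hk
  | cons r rest ih =>
    intro k hlen hk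
    cases k with
    | zero =>
      simp only [Nat.mul_zero, List.drop_zero, List.flatten_cons, List.getD_cons_zero]
      exact List.take_left' (hlen r (by simp))
    | succ k =>
      have hr : r.length = n := hlen r (by simp)
      have hstep : (r ++ rest.flatten).drop (n * (k + 1)) = rest.flatten.drop (n * k) := by
        rw [List.drop_append]
        have h1 : n * (k + 1) - r.length = n * k := by rw [hr, Nat.mul_succ]; omega
        have h2 : r.drop (n * (k + 1)) = [] := by
          apply List.drop_eq_nil_of_le; rw [hr, Nat.mul_succ]; omega
        rw [h1, h2, List.nil_append]
      simp only [List.flatten_cons, hstep, List.getD_cons_succ]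
      exact ih k (fun r hr => hlen r (by simp [hr])) (by simpa using hk)

lemma variant_eq (letters : List Char) (k : Nat) (hk : k < letters.length) :
    (letters.map PySem.Chars.lowerChar).take k
      ++ [PySem.Chars.upperChar ((letters.map PySem.Chars.lowerChar).getD k ' ')]
      ++ (letters.map PySem.Chars.lowerChar).drop (k + 1) = varRow letters k := by
  have hch : (letters.map PySem.Chars.lowerChar).length = letters.length := by simp
  have hset : (letters.map PySem.Chars.lowerChar).take k
      ++ [PySem.Chars.upperChar ((letters.map PySem.Chars.lowerChar).getD k ' ')]
      ++ (letters.map PySem.Chars.lowerChar).drop (k + 1)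
      = (letters.map PySem.Chars.lowerChar).set k
          (PySem.Chars.upperChar ((letters.map PySem.Chars.lowerChar).getD k ' ')) := by
    rw [List.append_assoc, List.singleton_append]
    rw [List.set_eq_take_append_cons_drop, if_pos (by omega : k < (letters.map PySem.Chars.lowerChar).length)]
  rw [hset]
  apply List.ext_getElem
  · simp [varRow]
  · intro j h1 h2
    have hj : j < letters.length := by simpa [varRow] using h2
    have hrhs : (varRow letters k)[j]'h2 =
        (if j = k then PySem.Chars.upperChar (letters.getD j ' ')
         else PySem.Chars.lowerChar (letters.getD j ' ')) := by
      simp [varRow]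
    rw [hrhs, List.getElem_set]
    by_cases hjk : j = k
    · subst hjk
      rw [if_pos rfl, if_pos rfl, List.getD_eq_getElem _ _ (by omega), List.getElem_map,
        upper_lower, List.getD_eq_getElem _ _ hj]
    · rw [if_neg (fun h => hjk h.symm), if_neg hjk, List.getElem_map,
        List.getD_eq_getElem _ _ hj]

lemma A_eq (word : String) (hne : word ≠ "") :
    f word = PySem.Str.join "-"
      ((List.range word.toList.length).map (fun k => String.ofList (varRow word.toList k))) := by
  unfold f
  rw [if_pos hne]
  dsimp only []
  set letters := word.toList with hlet
  set n := letters.length with hn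
  have hn0 : 0 < n := by
    rw [hn, hlet]
    simp only [List.length_pos_iff]
    intro h
    exact hne (by rwa [String.toList_eq_nil_iff] at h)
  -- inner fold is a map
  have hinner : ∀ (x : Int) (acc : List Char),
      (PySem.List.pyRange 0 (n : Int) 1).foldl (fun arr i =>
        if i = x then arr ++ [PySem.Chars.upperChar (PySem.List.pyGetD letters i ' ')]
        else arr ++ [PySem.Chars.lowerChar (PySem.List.pyGetD letters i ' ')]) acc
      = acc ++ (PySem.List.pyRange 0 (n : Int) 1).map (fun i =>
          if i = x then PySem.Chars.upperChar (PySem.List.pyGetD letters i ' ')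
          else PySem.Chars.lowerChar (PySem.List.pyGetD letters i ' ')) := by
    intro x acc
    rw [PySem.List.foldl_congr_mem _ _ (fun arr i => arr ++
        [if i = x then PySem.Chars.upperChar (PySem.List.pyGetD letters i ' ')
         else PySem.Chars.lowerChar (PySem.List.pyGetD letters i ' ')]) _
      (by intro acc i _; by_cases h : i = x <;> simp [h])]
    exact PySem.List.foldl_append_singleton_eq_map _ _ _
  simp only [hinner]
  rw [PySem.List.foldl_append_eq_flatMap, List.nil_append]
  rw [PySem.List.foldl_append_eq_flatMap, List.nil_append]
  have hsingle : ∀ (l : List Int) (h : Int → String), l.flatMap (fun i => [h i]) = l.map h := by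
    intro l h; induction l with
    | nil => simp
    | cons a t ih => simp [ih]
  rw [hsingle]
  set g : Int → List Char := (fun x => (PySem.List.pyRange 0 (n : Int) 1).map (fun i =>
      if i = x then PySem.Chars.upperChar (PySem.List.pyGetD letters i ' ')
      else PySem.Chars.lowerChar (PySem.List.pyGetD letters i ' '))) with hg
  have hflat : List.flatMap g (PySem.List.pyRange 0 ((n : Int) + 1) 1)
      = ((PySem.List.pyRange 0 ((n : Int) + 1) 1).map g).flatten := by
    induction (PySem.List.pyRange 0 ((n : Int) + 1) 1) with
    | nil => simp
    | cons a t ih => simp [ih]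
  have hrowlen : ∀ r ∈ (PySem.List.pyRange 0 ((n : Int) + 1) 1).map g, r.length = n := by
    intro r hr
    obtain ⟨x, _, rfl⟩ := List.mem_map.mp hr
    simp [hg, PySem.List.length_pyRange_one]
  have hrowslen : ((PySem.List.pyRange 0 ((n : Int) + 1) 1).map g).length = n + 1 := by
    simp [PySem.List.length_pyRange_one]
  have hy : PySem.Str.len word = (n : Int) := by
    rw [PySem.Str.len_eq]
  have harr : (List.flatMap g (PySem.List.pyRange 0 ((n : Int) + 1) 1)).length = (n + 1) * n := by
    rw [hflat, List.length_flatten, List.map_map]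
    have hconst : List.map (List.length ∘ g) (PySem.List.pyRange 0 ((n : Int) + 1) 1)
        = List.replicate (n + 1) n := by
      rw [List.map_congr_left (fun x hx =>
        show (List.length ∘ g) x = (fun _ => n) x from hrowlen (g x) (List.mem_map_of_mem hx))]
      rw [List.map_const', PySem.List.length_pyRange_one]
      have he : (((n : Int) + 1) - 0).toNat = n + 1 := by omega
      rw [he]
    rw [hconst, List.sum_replicate, smul_eq_mul]
  simp only [hy, harr]
  have hsub : (((n + 1) * n : Nat) : Int) - (n : Int) = ((n * n : Nat) : Int) := by
    push_cast; ring
  rw [hsub]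
  rw [PySem.List.pyRange_of_pos 0 ((n * n : Nat) : Int) (s := (n : Int)) (by exact_mod_cast hn0)]
  have hcount : (if (0 : Int) < ((n * n : Nat) : Int)
      then ((((n * n : Nat) : Int) - 0 + (n : Int) - 1) / (n : Int)).toNat else 0) = n := by
    rw [if_pos (by exact_mod_cast Nat.mul_pos hn0 hn0)]
    have h1 : ((n * n : Nat) : Int) - 0 + (n : Int) - 1 = ((n : Int) - 1) + (n : Int) * (n : Int) := by
      push_cast; ring
    rw [h1, Int.add_mul_ediv_left _ _ (by exact_mod_cast hn0.ne')]
    rw [Int.ediv_eq_zero_of_lt (by omega) (by omega)]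
    simp
  rw [hcount]
  rw [List.map_map]
  apply congrArg
  apply List.map_congr_left
  intro k hk
  have hkn : k < n := List.mem_range.mp hk
  simp only [Function.comp_apply, zero_add]
  have hcast : ((n : Int) * (k : Int)) = ((n * k : Nat) : Int) := by push_cast; ring
  rw [hcast, PySem.List.slice_natCast_add, hflat]
  rw [chunk _ n k hrowlen (by omega)]
  rw [List.getD_eq_getElem _ _ (by omega), List.getElem_map, PySem.List.getElem_pyRange_one,
    zero_add]
  apply congrArg
  rw [hg]
  show (PySem.List.pyRange 0 (n : Int) 1).map (fun i =>
      if i = (k : Int) then PySem.Chars.upperChar (PySem.List.pyGetD letters i ' ')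
      else PySem.Chars.lowerChar (PySem.List.pyGetD letters i ' ')) = varRow letters k
  rw [PySem.List.pyRange_zero_natCast n, List.map_map]
  unfold varRow
  apply List.map_congr_left
  intro j hj
  simp only [Function.comp_apply, Nat.cast_inj, PySem.List.pyGetD_natCast]

lemma B_eq (word : String) :
    f_alt word = PySem.Str.join "-"
      ((List.range word.toList.length).map (fun k => String.ofList (varRow word.toList k))) := by
  unfold f_alt
  dsimp only []
  rw [List.length_map]
  apply congrArg
  apply List.map_congr_left
  intro i hi
  exact congrArg String.ofList (variant_eq word.toList i (List.mem_range.mp hi))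

-- ===== VERDICT (by name: the statement is the Claim_ definition above) =====
theorem f_spec : Claim_equal_f := by
  intro word _
  unfold Spec_f
  by_cases hne : word = ""
  · subst hne; rfl
  · rw [A_eq word hne, B_eq word]
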